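-- pv_equiv track=rewrite | github.com/HJ1X/dsa-450 | searching and sorting/rotated sorted array/find_max_in_rotated_sorted_array.py | find_max_binary_search
-- ===== SOURCE A (Python) =====
-- def find_max_binary_search(arr):
--     n = len(arr)
--     low = 0
--     high = n-1
--
--     while low < high:
--         mid = (low + high) // 2
--
--         if arr[mid] > arr[high]:
--             low = mid + 1
--         else:
--             high = mid
--
--     return arr[low-1]
-- ===== SOURCE B (Python) =====
-- def find_max_binary_search(arr):
--     # Work on shrinking slices with a running "candidate" accumulator:
--     # acc starts as arr[-1] (the wraparound answer for an unrotated array)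
--     # and is updated to the mid element whenever the search moves right.
--     seg = arr
--     acc = arr[-1]
--     while len(seg) > 1:
--         m = (len(seg) - 1) // 2
--         if seg[m] > seg[-1]:
--             acc = seg[m]
--             seg = seg[m + 1:]
--         else:
--             seg = seg[:m + 1]
--     return acc
-- ===== Notes on version B (the rewrite author's own statement) =====
-- stated objective: alternative
-- what changed: B replaces A's index-pair binary search and final arr[low-1] wraparound lookup by a loop over shrinking list slices carrying a running candidate accumulator (initialised to arr[-1], updated to the mid element on every rightward step), so no indices into the original array survive the loop.
import Mathlib
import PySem

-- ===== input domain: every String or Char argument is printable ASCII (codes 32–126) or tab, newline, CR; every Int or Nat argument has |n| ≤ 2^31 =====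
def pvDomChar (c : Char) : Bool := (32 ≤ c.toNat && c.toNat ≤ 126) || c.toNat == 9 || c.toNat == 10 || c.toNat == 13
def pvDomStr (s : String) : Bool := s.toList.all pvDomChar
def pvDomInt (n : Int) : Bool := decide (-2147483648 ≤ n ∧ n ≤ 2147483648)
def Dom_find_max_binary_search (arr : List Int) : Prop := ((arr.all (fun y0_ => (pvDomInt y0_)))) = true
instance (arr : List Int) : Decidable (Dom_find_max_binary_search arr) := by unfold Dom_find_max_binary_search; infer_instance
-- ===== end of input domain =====

-- B replaces A's index-pair binary search (and final arr[low-1] lookup) by a loop over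
-- shrinking list slices with a running candidate accumulator; return value only (no mutation).
-- Both loops are made total with a fuel counter; each loop iteration shrinks high-low (resp.
-- the slice length), so the entry fuel arr.length + 1 is never exhausted, and the fuel-0 arm
-- repeats the loop-exit expression.

-- ===== PORT A =====
-- A's while-loop: state (low, high), loop body transcribed; arr[i] via pyGet? (in range whenever executed by Python; getD 0 never fires inside Pre_)
def pvLoopA (arr : List Int) (fuel : Nat) (low high : Int) : Int :=
  match fuel with
  | 0 => (PySem.List.pyGet? arr (low - 1)).getD 0
  | fuel + 1 =>
    if low < high then
      if (PySem.List.pyGet? arr (PySem.Int.floordiv (low + high) 2)).getD 0 >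
         (PySem.List.pyGet? arr high).getD 0 then
        pvLoopA arr fuel (PySem.Int.floordiv (low + high) 2 + 1) high
      else
        pvLoopA arr fuel low (PySem.Int.floordiv (low + high) 2)
    else
      (PySem.List.pyGet? arr (low - 1)).getD 0

def find_max_binary_search (arr : List Int) : Int :=
  pvLoopA arr (arr.length + 1) 0 ((arr.length : Int) - 1)

-- ===== PORT B =====
-- Source B's while-loop: state (seg, acc); seg[m], seg[-1] via pyGet?, slices via PySem.List.slice
def pvGoB (fuel : Nat) (seg : List Int) (acc : Int) : Int :=
  match fuel with
  | 0 => acc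
  | fuel + 1 =>
    if (seg.length : Int) > 1 then
      if (PySem.List.pyGet? seg (PySem.Int.floordiv ((seg.length : Int) - 1) 2)).getD 0 >
         (PySem.List.pyGet? seg (-1)).getD 0 then
        pvGoB fuel (PySem.List.slice seg (some (PySem.Int.floordiv ((seg.length : Int) - 1) 2 + 1)) none)
          ((PySem.List.pyGet? seg (PySem.Int.floordiv ((seg.length : Int) - 1) 2)).getD 0)
      else
        pvGoB fuel (PySem.List.slice seg none (some (PySem.Int.floordiv ((seg.length : Int) - 1) 2 + 1))) acc
    else
      acc

def find_max_binary_search_alt (arr : List Int) : Int :=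
  pvGoB (arr.length + 1) arr ((PySem.List.pyGet? arr (-1)).getD 0)

-- ===== PRECONDITION & SPEC =====
-- Pre_ excludes exactly the empty list, on which Python A raises IndexError (arr[-1]).
def Pre_find_max_binary_search (arr : List Int) : Prop := arr ≠ []
instance (arr : List Int) : Decidable (Pre_find_max_binary_search arr) := by unfold Pre_find_max_binary_search; infer_instance
def pvWitness_find_max_binary_search : List Int := [3, 4, 1, 2]

def Spec_find_max_binary_search (arr : List Int) (out : Int) : Prop := out = find_max_binary_search_alt arr
instance (arr : List Int) (out : Int) : Decidable (Spec_find_max_binary_search arr out) := by unfold Spec_find_max_binary_search; infer_instance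

-- ===== CLAIM =====
def Claim_equal_find_max_binary_search : Prop := ∀ (arr : List Int), Dom_find_max_binary_search arr → Pre_find_max_binary_search arr → Spec_find_max_binary_search arr (find_max_binary_search arr)

-- ===== LEMMAS AND PROOFS =====
theorem pvMidBounds (lo hi : Int) (h : lo < hi) :
    lo ≤ PySem.Int.floordiv (lo + hi) 2 ∧ PySem.Int.floordiv (lo + hi) 2 < hi := by
  rw [PySem.Int.floordiv_eq_ediv_of_pos (by omega)]
  omega

-- Invariant: A's loop on (lo, hi) equals B's loop on the slice arr[lo..hi] with the
-- accumulator holding arr[lo-1] (Python wraparound); both take the same branch each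
-- step and consume fuel in lockstep.
theorem pvLoopA_eq_goB (arr : List Int) :
    ∀ (fuel : Nat) (lo hi : Int), 0 ≤ lo → lo ≤ hi → hi < (arr.length : Int) →
    pvLoopA arr fuel lo hi =
      pvGoB fuel ((arr.drop lo.toNat).take (hi - lo + 1).toNat)
        ((PySem.List.pyGet? arr (lo - 1)).getD 0) := by
  intro fuel
  induction fuel with
  | zero => intro lo hi _ _ _; rfl
  | succ fuel ih =>
    intro lo hi h0 h1 h2
    set seg := (arr.drop lo.toNat).take (hi - lo + 1).toNat with hseg
    have hlen : seg.length = (hi - lo + 1).toNat := by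
      simp only [hseg, List.length_take, List.length_drop]; omega
    by_cases h : lo < hi
    · have hm := pvMidBounds lo hi h
      have hm' : PySem.Int.floordiv ((seg.length : Int) - 1) 2 =
          PySem.Int.floordiv (lo + hi) 2 - lo := by
        rw [hlen, PySem.Int.floordiv_eq_ediv_of_pos (by omega),
            PySem.Int.floordiv_eq_ediv_of_pos (by omega)]
        omega
      have hmidv : PySem.List.pyGet? seg (PySem.Int.floordiv (lo + hi) 2 - lo) =
          arr[(PySem.Int.floordiv (lo + hi) 2).toNat]? := by
        rw [PySem.List.pyGet?_of_nonneg _ (by omega), hseg]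
        rw [List.getElem?_take, if_pos (by omega), List.getElem?_drop]
        congr 1; omega
      have hlast : PySem.List.pyGet? seg (-1) = arr[hi.toNat]? := by
        rw [PySem.List.pyGet?_neg_one, List.getLast?_eq_getElem?, hseg]
        rw [List.getElem?_take, if_pos (by rw [← hseg, hlen] at *; omega), List.getElem?_drop]
        rw [← hseg, hlen]; congr 1; omega
      have hA' : PySem.List.pyGet? arr (PySem.Int.floordiv (lo + hi) 2) =
          arr[(PySem.Int.floordiv (lo + hi) 2).toNat]? :=
        PySem.List.pyGet?_of_nonneg _ (by omega)
      have hAh : PySem.List.pyGet? arr hi = arr[hi.toNat]? :=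
        PySem.List.pyGet?_of_nonneg _ (by omega)
      rw [pvLoopA, pvGoB, if_pos h, if_pos (by rw [hlen]; omega : ((seg.length : Int) > 1))]
      simp only [hm', hmidv, hlast, hA', hAh]
      by_cases hc : arr[(PySem.Int.floordiv (lo + hi) 2).toNat]?.getD 0 > arr[hi.toNat]?.getD 0
      · rw [if_pos hc, if_pos hc]
        rw [ih (PySem.Int.floordiv (lo + hi) 2 + 1) hi (by omega) (by omega) h2]
        congr 1
        · -- seg[m+1 :] = arr[mid+1 .. hi]
          rw [PySem.List.slice_from _ (by omega), hseg, List.drop_take, List.drop_drop]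
          congr 1
          · omega
          · congr 1; omega
        · -- new accumulator = arr[(mid+1) - 1]
          rw [show PySem.Int.floordiv (lo + hi) 2 + 1 - 1 = PySem.Int.floordiv (lo + hi) 2 from by ring, hA']
      · rw [if_neg hc, if_neg hc]
        rw [ih lo (PySem.Int.floordiv (lo + hi) 2) h0 (by omega) (by omega)]
        congr 1
        -- seg[: m+1] = arr[lo .. mid]
        rw [PySem.List.slice_to _ (by omega), hseg, List.take_take]
        congr 1; omega
    · rw [pvLoopA, pvGoB, if_neg h, if_neg (by rw [hlen]; omega : ¬ ((seg.length : Int) > 1))]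

-- ===== VERDICT =====
theorem find_max_binary_search_spec : Claim_equal_find_max_binary_search := by
  intro arr _ hne
  unfold Spec_find_max_binary_search find_max_binary_search find_max_binary_search_alt
  have hlen : 0 < arr.length := List.length_pos_iff.mpr hne
  rw [pvLoopA_eq_goB arr (arr.length + 1) 0 ((arr.length : Int) - 1) le_rfl (by omega) (by omega)]
  simp only [Int.toNat_zero, List.drop_zero, show (0 : Int) - 1 = -1 from by ring]
  rw [List.take_of_length_le (by omega)]
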